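-- pv_equiv track=rewrite | github.com/LGeoff31/leetcode-solutions | 3862-find-the-smallest-balanced-index/3862. Find the Smallest Balanced Index.py | smallestBalancedIndex
-- ===== SOURCE A (Python) =====
-- def smallestBalancedIndex(nums: list[int]) -> int:
--     if len(nums) == 1: return -1
--     l = sum(nums)
--     r = 1
--     for i in reversed(range(len(nums))):
--         l -= nums[i]
--         if l == r: return i
--         r *= nums[i]
--     # prefix = [0] + list(accumulate(nums)) # [0, 2, 3, 5]
--     # prefix = prefix[:-1]
--     # suffix = [1] * (len(nums)) # [1,2,1]
--     # suffix[-2] = nums[-1]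
--     # for i in range(len(suffix) - 3, -1, -1):
--     #     suffix[i] = nums[i+1] * suffix[i+1]
--
--
--     # for i in range(len(nums)):
--     #     if prefix[i] == suffix[i]:
--     #         return i
--     return -1
-- ===== SOURCE B (Python) =====
-- def smallestBalancedIndex(nums: list[int]) -> int:
--     # build full prefix-sum and suffix-product tables, then scan forward
--     prefix = []
--     s = 0
--     for x in nums:
--         prefix.append(s)
--         s += x
--     suffix = [1] * len(nums)
--     p = 1
--     for i in range(len(nums) - 1, -1, -1):
--         suffix[i] = p
--         p *= nums[i]
--     for i in range(len(nums)):
--         if prefix[i] == suffix[i]: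
--             return i
--     return -1
-- ===== Notes on version B (the rewrite author's own statement) =====
-- stated objective: alternative
-- what changed: B builds explicit prefix-sum and suffix-product tables and scans forward for the first (smallest) balanced index, instead of A's single backward pass with running values that returns the largest balanced index.
-- intended difference: On inputs with two or more balanced indices (e.g. [0,0,0]) A returns the largest balanced index (1) while B returns the smallest (0); the smallest is intended, as the problem is 'find the smallest balanced index'. — e.g. on smallestBalancedIndex([0, 0, 0]): A returns 1, B returns 0
import Mathlib
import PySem

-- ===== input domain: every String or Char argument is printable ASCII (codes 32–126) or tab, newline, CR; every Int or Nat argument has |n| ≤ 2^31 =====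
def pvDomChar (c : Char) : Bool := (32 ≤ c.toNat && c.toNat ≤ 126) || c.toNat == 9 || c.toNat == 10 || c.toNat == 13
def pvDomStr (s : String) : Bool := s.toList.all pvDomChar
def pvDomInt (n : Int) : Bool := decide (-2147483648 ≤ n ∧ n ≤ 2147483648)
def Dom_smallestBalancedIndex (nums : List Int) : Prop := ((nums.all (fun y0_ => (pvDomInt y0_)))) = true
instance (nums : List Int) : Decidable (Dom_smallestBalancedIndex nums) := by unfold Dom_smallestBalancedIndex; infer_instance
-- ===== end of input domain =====

-- B builds explicit prefix-sum and suffix-product tables and scans forward for the first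
-- (smallest) balanced index; A's single backward pass with running values returns the
-- largest balanced index instead — that difference is stated in D_ below.

-- ===== PORT A =====
-- the backward loop: for i in reversed(range(len(nums))): l -= nums[i]; if l == r: return i; r *= nums[i]
def goA (nums : List Int) : List Int → Int → Int → Int
  | [], _, _ => -1
  | i :: rest, l, r =>
    let x := PySem.List.pyGetD nums i 0   -- i comes from range(len(nums)), always in range
    let l' := l - x
    if l' == r then i else goA nums rest l' (r * x)

def smallestBalancedIndex (nums : List Int) : Int :=
  if nums.length == 1 then -1
  else goA nums (PySem.List.pyRange 0 (nums.length : Int) 1).reverse nums.sum 1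

-- ===== PORT B =====
-- prefix table: for x in nums: prefix.append(s); s += x
def prefB : List Int → Int → List Int
  | [], _ => []
  | x :: xs, s => s :: prefB xs (s + x)

-- suffix table, built backwards (for i in range(n-1,-1,-1): suffix[i] = p; p *= nums[i]);
-- returns (table, final p)
def suffB : List Int → List Int × Int
  | [] => ([], 1)
  | x :: xs =>
    let (t, p) := suffB xs
    (p :: t, p * x)

-- forward scan: for i in range(n): if prefix[i] == suffix[i]: return i
def scanB : List Int → List Int → Int → Int
  | a :: as_, b :: bs, i => if a == b then i else scanB as_ bs (i + 1)
  | _, _, _ => -1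

def smallestBalancedIndex_alt (nums : List Int) : Int :=
  scanB (prefB nums 0) (suffB nums).1 0

-- ===== PRECONDITION & SPEC =====
-- On inputs with two or more balanced indices (e.g. [0,0,0]) A returns the largest balanced
-- index (1) while B returns the smallest (0); the smallest is the intended value, as the
-- problem is 'find the smallest balanced index'.
def D_smallestBalancedIndex (nums : List Int) : Prop :=
  1 < ((List.range nums.length).filter
    (fun i => (nums.take i).sum == (nums.drop (i+1)).prod)).length
instance (nums : List Int) : Decidable (D_smallestBalancedIndex nums) := by
  unfold D_smallestBalancedIndex; infer_instance

def Spec_smallestBalancedIndex (nums : List Int) (out : Int) : Prop :=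
  ¬ D_smallestBalancedIndex nums → out = smallestBalancedIndex_alt nums
instance (nums : List Int) (out : Int) : Decidable (Spec_smallestBalancedIndex nums out) := by
  unfold Spec_smallestBalancedIndex; infer_instance

def pvDiffWitness_smallestBalancedIndex : List Int := [0, 0, 0]
def pvDiffWitnessOut_smallestBalancedIndex : Int × Int := (1, 0)

-- ===== CLAIM (what is proved, stated in full; the proofs are below) =====
def Claim_unchanged_smallestBalancedIndex : Prop := ∀ (nums : List Int), Dom_smallestBalancedIndex nums → Spec_smallestBalancedIndex nums (smallestBalancedIndex nums)
def Claim_changed_smallestBalancedIndex : Prop := Dom_smallestBalancedIndex (pvDiffWitness_smallestBalancedIndex) ∧ D_smallestBalancedIndex (pvDiffWitness_smallestBalancedIndex) ∧ smallestBalancedIndex (pvDiffWitness_smallestBalancedIndex) = pvDiffWitnessOut_smallestBalancedIndex.1 ∧ smallestBalancedIndex_alt (pvDiffWitness_smallestBalancedIndex) = pvDiffWitnessOut_smallestBalancedIndex.2 ∧ pvDiffWitnessOut_smallestBalancedIndex.1 ≠ pvDiffWitnessOut_smallestBalancedIndex.2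
def Claim_exact_smallestBalancedIndex : Prop := ∀ (nums : List Int), Dom_smallestBalancedIndex nums → D_smallestBalancedIndex nums → smallestBalancedIndex nums ≠ smallestBalancedIndex_alt nums

-- ===== LEMMAS AND PROOFS =====

-- i is a balanced index of nums
def balP (nums : List Int) (i : Nat) : Bool :=
  (nums.take i).sum == (nums.drop (i+1)).prod

-- the balanced indices, in increasing order
def balL (nums : List Int) : List Nat :=
  (List.range nums.length).filter (balP nums)

def optIdx : Option Nat → Int
  | some k => (k : Int)
  | none => -1

-- A's backward loop returns the LAST balanced index below k (or -1)
lemma goA_char (nums : List Int) : ∀ (k : Nat), k ≤ nums.length →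
    goA nums (((List.range k).reverse).map Int.ofNat)
      ((nums.take k).sum) ((nums.drop k).prod)
    = optIdx ((List.range k).filter (balP nums)).getLast? := by
  intro k
  induction k with
  | zero => intro _; simp [goA, optIdx]
  | succ k ih =>
    intro hk
    have hkn : k < nums.length := hk
    rw [List.range_succ, List.reverse_append]
    simp only [List.reverse_cons, List.reverse_nil, List.nil_append, List.map_cons,
      List.cons_append]
    rw [goA]
    have hx : PySem.List.pyGetD nums (Int.ofNat k) 0 = nums[k] := by
      have := PySem.List.pyGetD_natCast (xs := nums) (n := k) (d := 0)
      simp only [Int.ofNat_eq_natCast] at *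
      rw [this, List.getD_eq_getElem?_getD, List.getElem?_eq_getElem hkn]; rfl
    rw [hx]
    have hsum : (nums.take (k+1)).sum - nums[k] = (nums.take k).sum := by
      rw [List.sum_take_succ nums k hkn]; ring
    have hdrop : nums.drop k = nums[k] :: nums.drop (k+1) :=
      List.drop_eq_getElem_cons hkn
    rw [List.filter_append]
    by_cases hb : balP nums k
    · have hb' : ((nums.take k).sum == (nums.drop (k+1)).prod) = true := hb
      simp only [hsum, hb', if_true]
      have : List.filter (balP nums) [k] = [k] := by simp [hb]
      rw [this, List.getLast?_concat]
      rfl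
    · have hb' : ((nums.take k).sum == (nums.drop (k+1)).prod) = false :=
        eq_false_of_ne_true hb
      simp only [hsum, hb']
      have hprod : (nums.drop (k+1)).prod * nums[k] = (nums.drop k).prod := by
        rw [hdrop, List.prod_cons]; ring
      rw [hprod, ih (le_of_lt hkn)]
      have : List.filter (balP nums) [k] = [] := by simp [hb]
      rw [this, List.append_nil]
      simp

lemma A_char (nums : List Int) :
    smallestBalancedIndex nums = optIdx (balL nums).getLast? := by
  rw [smallestBalancedIndex]
  by_cases h1 : nums.length = 1
  · obtain ⟨a, ha⟩ := List.length_eq_one_iff.mp h1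
    subst ha
    simp [balL, balP, optIdx, List.range_succ]
  · have h1' : (nums.length == 1) = false := by simp [h1]
    simp only [h1', Bool.false_eq_true, if_false]
    have hpr : PySem.List.pyRange 0 (nums.length : Int) 1 = (List.range nums.length).map Int.ofNat := by
      rw [PySem.List.pyRange_one]; simp
    rw [hpr, ← List.map_reverse]
    have h := goA_char nums nums.length le_rfl
    rw [List.take_length, List.drop_length] at h
    simpa [balL] using h

lemma suffB_snd (xs : List Int) : (suffB xs).2 = xs.prod := by
  induction xs with
  | nil => rfl
  | cons x xs ih => simp [suffB, ih, mul_comm]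

lemma suffB_fst_cons (x : Int) (xs : List Int) :
    (suffB (x :: xs)).1 = (suffB xs).2 :: (suffB xs).1 := rfl

-- B's forward scan returns the FIRST index where the two tables agree (or -1)
lemma scan_char : ∀ (xs : List Int) (s c : Int),
    scanB (prefB xs s) (suffB xs).1 c =
      match ((List.range xs.length).filter
          (fun i => s + (xs.take i).sum == (xs.drop (i+1)).prod)).head? with
      | some k => c + k
      | none => -1 := by
  intro xs
  induction xs with
  | nil => intro s c; simp [prefB, suffB, scanB]
  | cons x xs ih =>
    intro s c
    rw [prefB, suffB_fst_cons, scanB, suffB_snd]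
    rw [List.length_cons, List.range_succ_eq_map]
    rw [List.filter_cons]
    simp only [List.take_zero, List.sum_nil, add_zero, List.drop_succ_cons, List.drop_zero]
    by_cases hs : s = xs.prod
    · have : (s == xs.prod) = true := beq_iff_eq.mpr hs
      simp only [this, if_true, List.head?_cons]
      norm_num
    · have hsf : (s == xs.prod) = false := beq_eq_false_iff_ne.mpr hs
      simp only [hsf, Bool.false_eq_true, if_false]
      rw [List.filter_map, List.head?_map]
      have hfun : List.filter ((fun i => s + ((x :: xs).take i).sum == (xs.drop i).prod) ∘ Nat.succ) (List.range xs.length)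
          = List.filter (fun i => (s + x) + (xs.take i).sum == (xs.drop (i+1)).prod) (List.range xs.length) := by
        apply List.filter_congr
        intro i _
        simp [Function.comp, List.take_succ_cons, List.sum_cons, add_assoc]
      rw [hfun, ih (s + x) (c + 1)]
      cases hh : (List.filter (fun i => (s + x) + (xs.take i).sum == (xs.drop (i+1)).prod) (List.range xs.length)).head? with
      | none => simp
      | some k => simp only [Option.map_some]; push_cast; ring

lemma B_char (nums : List Int) :
    smallestBalancedIndex_alt nums = optIdx (balL nums).head? := by
  rw [smallestBalancedIndex_alt, scan_char]
  have hfun : (fun i => (0:Int) + (nums.take i).sum == (nums.drop (i+1)).prod) = balP nums := by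
    funext i; simp [balP]
  rw [hfun]
  cases hh : (balL nums).head? with
  | none => rw [balL] at hh; rw [hh]; rfl
  | some k => rw [balL] at hh; rw [hh]; simp [optIdx]

lemma balL_pairwise (nums : List Int) : (balL nums).Pairwise (· < ·) :=
  List.Pairwise.filter _ (List.pairwise_lt_range)

-- D_ counts the same filter balL names
lemma D_iff (nums : List Int) : D_smallestBalancedIndex nums ↔ 1 < (balL nums).length := by
  rw [D_smallestBalancedIndex, balL]
  have : balP nums = fun i => (nums.take i).sum == (nums.drop (i+1)).prod := rfl
  rw [this]

lemma notD_spec (nums : List Int) (hnd : ¬ D_smallestBalancedIndex nums) :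
    smallestBalancedIndex nums = smallestBalancedIndex_alt nums := by
  rw [A_char, B_char]
  rw [D_iff] at hnd
  cases hb : balL nums with
  | nil => rfl
  | cons a t =>
    cases t with
    | nil => rfl
    | cons b t' => rw [hb] at hnd; simp at hnd

lemma D_spec (nums : List Int) (hd : D_smallestBalancedIndex nums) :
    smallestBalancedIndex nums ≠ smallestBalancedIndex_alt nums := by
  rw [A_char, B_char]
  rw [D_iff] at hd
  cases hb : balL nums with
  | nil => rw [hb] at hd; simp at hd
  | cons a rest =>
    cases hr : rest with
    | nil => rw [hb, hr] at hd; simp at hd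
    | cons b t =>
      have hpw := balL_pairwise nums
      rw [hb, hr] at hpw
      have hne : (b :: t) ≠ [] := by simp
      have hmem : (b :: t).getLast hne ∈ b :: t := List.getLast_mem hne
      have halt : a < (b :: t).getLast hne := (List.pairwise_cons.mp hpw).1 _ hmem
      rw [List.getLast?_cons_cons, List.getLast?_eq_some_getLast hne, List.head?_cons]
      simp [optIdx]
      omega

-- ===== VERDICT (by name: the statement is the Claim_ definition above) =====
theorem smallestBalancedIndex_spec : Claim_unchanged_smallestBalancedIndex := by
  intro nums _ hnd
  exact notD_spec nums hnd

theorem smallestBalancedIndex_changed : Claim_changed_smallestBalancedIndex := by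
  unfold Claim_changed_smallestBalancedIndex; decide

theorem smallestBalancedIndex_tight : Claim_exact_smallestBalancedIndex := by
  intro nums _ hd
  exact D_spec nums hd
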